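-- pv_equiv track=rewrite | github.com/hithwen/advent2017 | 04_passphrases.py | is_valid_passphrase
-- ===== SOURCE A (Python) =====
-- def is_valid_passphrase(passphrase):
--     words = passphrase.strip().split(' ')
--     word_set = set()
--     for w in words:
--         if w in word_set:
--             return False
--         word_set.add(w)
--     return True
-- ===== SOURCE B (Python) =====
-- def is_valid_passphrase(passphrase):
--     words = sorted(passphrase.strip().split(' '))
--     return all(a != b for a, b in zip(words, words[1:]))
-- ===== Notes on version B (the rewrite author's own statement) =====
-- stated objective: alternative
-- what changed: Replaces the hash-set scan with early return by sorting the words and checking that no two adjacent words in the sorted order are equal.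
import Mathlib
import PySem

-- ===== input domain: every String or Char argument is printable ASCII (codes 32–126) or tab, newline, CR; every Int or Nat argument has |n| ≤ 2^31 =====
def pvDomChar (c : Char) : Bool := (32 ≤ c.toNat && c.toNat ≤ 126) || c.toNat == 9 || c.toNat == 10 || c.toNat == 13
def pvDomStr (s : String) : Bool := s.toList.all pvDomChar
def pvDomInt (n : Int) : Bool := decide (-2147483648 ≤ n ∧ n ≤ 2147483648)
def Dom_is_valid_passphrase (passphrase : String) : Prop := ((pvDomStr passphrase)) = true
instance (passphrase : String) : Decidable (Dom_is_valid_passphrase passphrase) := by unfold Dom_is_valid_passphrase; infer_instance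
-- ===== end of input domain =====

-- B sorts the words and checks adjacent neighbours instead of A's scan with a maintained set (alternative algorithm, same result).

-- ===== PORT A =====
-- the 'for w in words' loop with early 'return False', carrying the growing word_set
def pvLoopA : List (List Char) → PySem.Set (List Char) → Bool
  | [], _ => true
  | w :: ws, word_set =>
      if PySem.Set.contains word_set w then false
      else pvLoopA ws (PySem.Set.add word_set w)

def is_valid_passphrase (passphrase : String) : Bool :=
  let words := PySem.Chars.splitOn (PySem.Chars.strip passphrase.toList) [' ']
  pvLoopA words PySem.Set.empty

-- ===== PORT B =====
-- all(a != b for a, b in zip(words, words[1:])) over the sorted word list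
def pvAdjDistinct : List String → Bool
  | [] => true
  | [_] => true
  | a :: b :: t => a != b && pvAdjDistinct (b :: t)

def is_valid_passphrase_alt (passphrase : String) : Bool :=
  let words := PySem.List.sorted
    ((PySem.Chars.splitOn (PySem.Chars.strip passphrase.toList) [' ']).map String.ofList)
    (fun x => x) false
  pvAdjDistinct words

-- ===== PRECONDITION & SPEC =====
def Spec_is_valid_passphrase (passphrase : String) (out : Bool) : Prop := out = is_valid_passphrase_alt passphrase
instance (passphrase : String) (out : Bool) : Decidable (Spec_is_valid_passphrase passphrase out) := by unfold Spec_is_valid_passphrase; infer_instance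

-- ===== CLAIM (what is proved, stated in full; the proofs are below) =====
def Claim_equal_is_valid_passphrase : Prop := ∀ (passphrase : String), Dom_is_valid_passphrase passphrase → Spec_is_valid_passphrase passphrase (is_valid_passphrase passphrase)

-- ===== LEMMAS AND PROOFS =====

-- A's loop returns true exactly when the remaining words are distinct and disjoint from the set so far
theorem pvLoopA_iff (l : List (List Char)) (s : PySem.Set (List Char)) :
    pvLoopA l s = true ↔ (l.Nodup ∧ ∀ w ∈ l, w ∉ s) := by
  induction l generalizing s with
  | nil => simp [pvLoopA]
  | cons w ws ih =>
      simp only [pvLoopA]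
      cases hc : PySem.Set.contains s w with
      | true =>
          have hw : w ∈ s := (PySem.Set.contains_iff s w).mp hc
          constructor
          · intro hf; exact absurd hf Bool.false_ne_true
          · rintro ⟨_, hdisj⟩
            exact absurd hw (hdisj w (by simp))
      | false =>
          have hw : w ∉ s := fun hmem => by
            rw [(PySem.Set.contains_iff s w).mpr hmem] at hc; cases hc
          rw [if_neg (by simp), ih]
          constructor
          · rintro ⟨hnd, hdisj⟩
            refine ⟨List.nodup_cons.mpr ⟨?_, hnd⟩, ?_⟩
            · intro hmem
              have := hdisj w hmem
              rw [PySem.Set.mem_add] at this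
              exact this (Or.inr rfl)
            · intro x hx
              rcases List.mem_cons.mp hx with rfl | hx
              · exact hw
              · intro hxs
                exact hdisj x hx ((PySem.Set.mem_add _ _ _).mpr (Or.inl hxs))
          · rintro ⟨hnd, hdisj⟩
            have hnd' := List.nodup_cons.mp hnd
            refine ⟨hnd'.2, ?_⟩
            intro x hx hxadd
            rcases (PySem.Set.mem_add _ _ _).mp hxadd with hxs | hxw
            · exact hdisj x (List.mem_cons_of_mem _ hx) hxs
            · exact hnd'.1 (hxw ▸ hx)

-- on a ≤-sorted list, adjacent distinctness is exactly Nodup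
theorem pvAdjDistinct_iff_nodup (ws : List String) (h : ws.Pairwise (· ≤ ·)) :
    pvAdjDistinct ws = true ↔ ws.Nodup := by
  induction ws with
  | nil => simp [pvAdjDistinct]
  | cons a t ih =>
      cases t with
      | nil => simp [pvAdjDistinct]
      | cons b u =>
          have hpw := List.pairwise_cons.mp h
          have hrest := ih hpw.2
          have hab : a ≤ b := hpw.1 b (by simp)
          have hbu : ∀ x ∈ u, b ≤ x := (List.pairwise_cons.mp hpw.2).1
          simp only [pvAdjDistinct, Bool.and_eq_true, bne_iff_ne, ne_eq, hrest,
            List.nodup_cons, List.mem_cons]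
          constructor
          · rintro ⟨hne, hna, hnd⟩
            refine ⟨?_, hna, hnd⟩
            rintro (rfl | ha)
            · exact hne rfl
            · have hlt : a < b := lt_of_le_of_ne hab hne
              exact absurd (hbu a ha) (not_le.mpr hlt)
          · rintro ⟨hmem, hna, hnd⟩
            exact ⟨fun hh => hmem (Or.inl hh), hna, hnd⟩

theorem is_valid_passphrase_eq_alt (p : String) :
    is_valid_passphrase p = is_valid_passphrase_alt p := by
  simp only [is_valid_passphrase, is_valid_passphrase_alt]
  set words := PySem.Chars.splitOn (PySem.Chars.strip p.toList) [' '] with hw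
  set ws := PySem.List.sorted (words.map String.ofList) (fun x => x) false with hws
  have hperm : ws.Perm (words.map String.ofList) := PySem.List.sorted_perm _ _ _
  have hpw : ws.Pairwise (· ≤ ·) := by
    have := PySem.List.sorted_pairwise (xs := words.map String.ofList) (key := fun x => x)
    exact this
  have hA : pvLoopA words PySem.Set.empty = true ↔ words.Nodup := by
    rw [pvLoopA_iff]
    constructor
    · exact fun h => h.1
    · intro h; exact ⟨h, by intro w _ hw'; simp [PySem.Set.empty] at hw'⟩
  have hB : pvAdjDistinct ws = true ↔ words.Nodup := by
    rw [pvAdjDistinct_iff_nodup ws hpw, hperm.nodup_iff,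
      List.nodup_map_iff (fun a b hab => by have := congrArg String.toList hab; simpa using this)]
  rw [Bool.eq_iff_iff, hA, hB]

-- ===== VERDICT (by name: the statement is the Claim_ definition above) =====
theorem is_valid_passphrase_spec : Claim_equal_is_valid_passphrase := by
  intro p _
  exact is_valid_passphrase_eq_alt p
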